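-- pv_equiv track=rewrite | github.com/cschladetsch/PySortMarkdown | run_tests.py | verify_sorting_properties
-- ===== SOURCE A (Python) =====
-- def verify_sorting_properties(content: str):
--     """Verify that sections are properly sorted."""
--     lines = content.split('\n')
--     headers = []
--
--     for line in lines:
--         if line.startswith('#'):
--             level = len(line) - len(line.lstrip('#'))
--             title = line.lstrip('#').strip()
--             headers.append((level, title))
--
--     # Check if top-level headers are sorted
--     top_level = [(level, title) for level, title in headers if level == 1]
--     sorted_top = sorted(top_level, key=lambda x: x[1].lower())
--
--     return top_level == sorted_top
-- ===== SOURCE B (Python) =====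
-- def verify_sorting_properties(content: str):
--     """Verify that sections are properly sorted (single ordered scan, no sort)."""
--     prev = None
--     for line in content.split('\n'):
--         if line.startswith('#'):
--             stripped = line.lstrip('#')
--             if len(line) - len(stripped) == 1:
--                 title = stripped.strip().lower()
--                 if prev is not None and title < prev:
--                     return False
--                 prev = title
--     return True
-- ===== Notes on version B (the rewrite author's own statement) =====
-- stated objective: simpler
-- what changed: Replaced collect-all-top-level-headers + stable sort + list-equality by a single document-order scan that keeps only the previous lowered title and fails on the first strict decrease.
import Mathlib
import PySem

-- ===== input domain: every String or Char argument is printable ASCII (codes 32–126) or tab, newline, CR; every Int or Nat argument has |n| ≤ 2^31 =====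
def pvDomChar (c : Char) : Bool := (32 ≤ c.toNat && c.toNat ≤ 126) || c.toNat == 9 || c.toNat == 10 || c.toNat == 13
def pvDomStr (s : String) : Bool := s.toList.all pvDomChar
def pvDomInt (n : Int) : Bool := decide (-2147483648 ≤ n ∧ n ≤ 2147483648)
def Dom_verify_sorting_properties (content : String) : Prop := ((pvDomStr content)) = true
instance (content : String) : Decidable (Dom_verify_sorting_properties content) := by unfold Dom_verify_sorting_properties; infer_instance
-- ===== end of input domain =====

-- B replaces collect + stable sort + equality test by a single document-order scan
-- keeping only the previous lowered top-level title (objective: simpler).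

-- ===== PORT A =====
def verify_sorting_properties (content : String) : Bool :=
  let lines := PySem.Chars.splitOn content.toList ['\n']
  let headers := lines.foldl (fun hs line =>
    if PySem.Chars.startswith line ['#'] then
      -- line.lstrip('#'): exact — drops exactly the leading '#' characters
      let stripped := line.dropWhile (fun c => c == '#')
      let level : Int := (line.length : Int) - (stripped.length : Int)
      let title := PySem.Chars.strip stripped
      hs ++ [(level, title)]
    else hs) ([] : List (Int × List Char))
  let top_level := headers.filter (fun p => p.1 == (1 : Int))
  let sorted_top := PySem.List.sorted top_level (fun x => PySem.Chars.lower x.2)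
  top_level == sorted_top

-- ===== PORT B =====
def vspScan : List (List Char) → Option (List Char) → Bool
  | [], _ => true
  | line :: rest, prev =>
    if PySem.Chars.startswith line ['#'] then
      -- line.lstrip('#'): exact — drops exactly the leading '#' characters
      let stripped := line.dropWhile (fun c => c == '#')
      if line.length - stripped.length == 1 then
        let title := PySem.Chars.lower (PySem.Chars.strip stripped)
        match prev with
        | some p => if title < p then false else vspScan rest (some title)
        | none => vspScan rest (some title)
      else vspScan rest prev
    else vspScan rest prev

def verify_sorting_properties_alt (content : String) : Bool :=
  vspScan (PySem.Chars.splitOn content.toList ['\n']) none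

-- ===== PRECONDITION & SPEC =====
def Spec_verify_sorting_properties (content : String) (out : Bool) : Prop := out = verify_sorting_properties_alt content
instance (content : String) (out : Bool) : Decidable (Spec_verify_sorting_properties content out) := by unfold Spec_verify_sorting_properties; infer_instance

-- ===== CLAIM (what is proved, stated in full; the proofs are below) =====
def Claim_equal_verify_sorting_properties : Prop := ∀ (content : String), Dom_verify_sorting_properties content → Spec_verify_sorting_properties content (verify_sorting_properties content)

-- ===== LEMMAS AND PROOFS =====

-- the header list A builds, as a structural recursion (for induction)
def vspHdrs : List (List Char) → List (Int × List Char)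
  | [] => []
  | line :: rest =>
    if PySem.Chars.startswith line ['#'] then
      let stripped := line.dropWhile (fun c => c == '#')
      ((line.length : Int) - (stripped.length : Int), PySem.Chars.strip stripped) :: vspHdrs rest
    else vspHdrs rest

-- the lowered titles of the level-1 headers, in document order
def vspKeys : List (List Char) → List (List Char)
  | [] => []
  | line :: rest =>
    if PySem.Chars.startswith line ['#'] then
      let stripped := line.dropWhile (fun c => c == '#')
      if line.length - stripped.length == 1 then
        PySem.Chars.lower (PySem.Chars.strip stripped) :: vspKeys rest
      else vspKeys rest
    else vspKeys rest

theorem vsp_foldl_eq (lines : List (List Char)) (acc : List (Int × List Char)) :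
    lines.foldl (fun hs line =>
      if PySem.Chars.startswith line ['#'] then
        let stripped := line.dropWhile (fun c => c == '#')
        let level : Int := (line.length : Int) - (stripped.length : Int)
        let title := PySem.Chars.strip stripped
        hs ++ [(level, title)]
      else hs) acc = acc ++ vspHdrs lines := by
  induction lines generalizing acc with
  | nil => simp [vspHdrs]
  | cons line rest ih =>
    simp only [List.foldl_cons, vspHdrs]
    split_ifs with h <;> simp [ih]

theorem vsp_keys_eq (lines : List (List Char)) :
    ((vspHdrs lines).filter (fun p => p.1 == (1 : Int))).map (fun p => PySem.Chars.lower p.2)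
      = vspKeys lines := by
  induction lines with
  | nil => simp [vspHdrs, vspKeys]
  | cons line rest ih =>
    by_cases h : PySem.Chars.startswith line ['#'] = true
    · simp only [vspHdrs, vspKeys, if_pos h]
      have hle := List.length_dropWhile_le (p := fun c => c == '#') (l := line)
      by_cases h1 : line.length - (line.dropWhile (fun c => c == '#')).length = 1
      · have h1' : (line.length : Int) - ((line.dropWhile (fun c => c == '#')).length : Int) = 1 := by
          omega
        simp [h1, h1', ih]
      · have h1' : (line.length : Int) - ((line.dropWhile (fun c => c == '#')).length : Int) ≠ 1 := by
          omega
        simp [h1, h1', ih]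
    · simp only [vspHdrs, vspKeys, if_neg h]
      exact ih

theorem vsp_A_char (content : String) :
    verify_sorting_properties content
      = decide ((vspKeys (PySem.Chars.splitOn content.toList ['\n'])).Pairwise (· ≤ ·)) := by
  have key : ∀ tl : List (Int × List Char),
      (tl == PySem.List.sorted tl (fun x => PySem.Chars.lower x.2))
      = decide ((tl.map (fun p => PySem.Chars.lower p.2)).Pairwise (· ≤ ·)) := by
    intro tl
    rw [show (fun (a b : List Char) => a.decidableLT b) = (LinearOrder.toDecidableLT (α := List Char))
        from funext fun a => funext fun b => Subsingleton.elim _ _]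
    rcases Bool.eq_false_or_eq_true
        (decide ((tl.map (fun p => PySem.Chars.lower p.2)).Pairwise (· ≤ ·))) with hd | hd
    · rw [hd]
      rw [decide_eq_true_eq, List.pairwise_map] at hd
      exact beq_iff_eq.mpr (PySem.List.sorted_eq_self_of_pairwise tl _ hd).symm
    · rw [hd]
      rw [decide_eq_false_iff_not] at hd
      rw [List.pairwise_map] at hd
      apply beq_eq_false_iff_ne.mpr
      intro he
      exact hd (he ▸ PySem.List.sorted_pairwise tl (fun x => PySem.Chars.lower x.2))
  simp only [verify_sorting_properties, vsp_foldl_eq, List.nil_append, key, vsp_keys_eq]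

theorem vsp_scan_char (lines : List (List Char)) :
    (∀ p, vspScan lines (some p) = decide ((p :: vspKeys lines).Pairwise (· ≤ ·)))
    ∧ vspScan lines none = decide ((vspKeys lines).Pairwise (· ≤ ·)) := by
  induction lines with
  | nil => simp [vspScan, vspKeys]
  | cons line rest ih =>
    obtain ⟨ihs, ihn⟩ := ih
    by_cases h : PySem.Chars.startswith line ['#'] = true
    · by_cases h1 : (line.length - (line.dropWhile (fun c => c == '#')).length == 1) = true
      · set t := PySem.Chars.lower (PySem.Chars.strip (line.dropWhile (fun c => c == '#'))) with ht
        have hkeys : vspKeys (line :: rest) = t :: vspKeys rest := by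
          simp only [vspKeys, if_pos h, if_pos h1, ht]
        constructor
        · intro p
          rw [hkeys]
          show (if PySem.Chars.startswith line ['#'] = true then _ else _) = _
          rw [if_pos h]
          show (if (line.length - (line.dropWhile (fun c => c == '#')).length == 1) = true
                then _ else _) = _
          rw [if_pos h1]
          show (if t < p then false else vspScan rest (some t)) = _
          by_cases hlt : t < p
          · rw [if_pos hlt]
            have : ¬ (p :: t :: vspKeys rest).Pairwise (· ≤ ·) := by
              intro hpw
              rw [List.pairwise_cons] at hpw
              exact absurd (hpw.1 t (by simp)) (not_le.mpr hlt)
            simp [this]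
          · rw [if_neg hlt, ihs t]
            have hp : (p :: t :: vspKeys rest).Pairwise (· ≤ ·)
                ↔ (t :: vspKeys rest).Pairwise (· ≤ ·) := by
              constructor
              · intro h2
                exact h2.sublist (List.sublist_cons_self p _)
              · intro h2
                refine List.pairwise_cons.mpr ⟨?_, h2⟩
                intro a ha
                rcases List.mem_cons.mp ha with rfl | ha
                · exact not_lt.mp hlt
                · exact le_trans (not_lt.mp hlt) ((List.pairwise_cons.mp h2).1 a ha)
            exact decide_eq_decide.mpr hp.symm
        · rw [hkeys]
          show (if PySem.Chars.startswith line ['#'] = true then _ else _) = _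
          rw [if_pos h]
          show (if (line.length - (line.dropWhile (fun c => c == '#')).length == 1) = true
                then _ else _) = _
          rw [if_pos h1]
          exact ihs t
      · have hkeys : vspKeys (line :: rest) = vspKeys rest := by
          simp only [vspKeys, if_pos h, if_neg h1]
        have hscan : ∀ pr, vspScan (line :: rest) pr = vspScan rest pr := by
          intro pr
          show (if PySem.Chars.startswith line ['#'] = true then _ else _) = _
          rw [if_pos h]
          show (if (line.length - (line.dropWhile (fun c => c == '#')).length == 1) = true
                then _ else _) = _
          rw [if_neg h1]
        exact ⟨fun p => by rw [hkeys, hscan, ihs], by rw [hkeys, hscan, ihn]⟩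
    · have hkeys : vspKeys (line :: rest) = vspKeys rest := by
        simp only [vspKeys, if_neg h]
      have hscan : ∀ pr, vspScan (line :: rest) pr = vspScan rest pr := by
        intro pr
        show (if PySem.Chars.startswith line ['#'] = true then _ else _) = _
        rw [if_neg h]
      exact ⟨fun p => by rw [hkeys, hscan, ihs], by rw [hkeys, hscan, ihn]⟩

-- ===== VERDICT (by name: the statement is the Claim_ definition above) =====
theorem verify_sorting_properties_spec : Claim_equal_verify_sorting_properties := by
  intro content _
  unfold Spec_verify_sorting_properties verify_sorting_properties_alt
  rw [vsp_A_char, (vsp_scan_char _).2]
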